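-- pv_equiv track=rewrite | github.com/SSAFY-9-S4-STUDY/SWEAB | day41/P_42892/P_42892_seojam.py | solution
-- ===== SOURCE A (Python) =====
-- from copy import deepcopy
--
-- def split_nodes(nodeinfo):
--     parent = nodeinfo.pop(0)
--     leftNodes, rightNodes = [], []
--
--     for node in nodeinfo:
--         if parent[0] > node[0]:
--             leftNodes.append(node)
--         else:
--             rightNodes.append(node)
--
--     return parent, leftNodes, rightNodes
--
-- def preorder(nodeinfo, answer):
--     if not nodeinfo:
--         return
--
--     parent, leftNodes, rightNodes = split_nodes(nodeinfo)
--     answer.append(parent[2])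
--     preorder(leftNodes, answer)
--     preorder(rightNodes, answer)
--
-- def postorder(nodeinfo, answer):
--     if not nodeinfo:
--         return
--
--     parent, leftNodes, rightNodes = split_nodes(nodeinfo)
--     postorder(leftNodes, answer)
--     postorder(rightNodes, answer)
--     answer.append(parent[2])
--
-- def solution(nodeinfo):
--     # 0. nodeinfo에 노드번호 저장
--     for idx, node in enumerate(nodeinfo):
--         node.append(idx + 1)
--
--     # 1. y-x 순 nodeinfo 정렬
--     nodeinfo.sort(key=lambda node: (-node[1], node[0]))
--
--     # 2. 전위 순회
--     preanswer = []
--     preorder(deepcopy(nodeinfo), preanswer)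
--
--     # 3. 후위 순회
--     postanswer = []
--     postorder(deepcopy(nodeinfo), postanswer)
--
--     return [preanswer, postanswer]
-- ===== SOURCE B (Python) =====
-- def _insert(t, x, v):
--     if t is None:
--         return (x, v, None, None)
--     if x < t[0]:
--         return (t[0], t[1], _insert(t[2], x, v), t[3])
--     return (t[0], t[1], t[2], _insert(t[3], x, v))
--
-- def _walk(t, pre, post):
--     if t is None:
--         return
--     pre.append(t[1])
--     _walk(t[2], pre, post)
--     _walk(t[3], pre, post)
--     post.append(t[1])
--
-- def solution(nodeinfo):
--     for idx, node in enumerate(nodeinfo):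
--         node.append(idx + 1)
--     nodeinfo.sort(key=lambda node: (-node[1], node[0]))
--     root = None
--     for node in nodeinfo:
--         root = _insert(root, node[0], node[2])
--     pre, post = [], []
--     _walk(root, pre, post)
--     return [pre, post]
-- ===== Notes on version B (the rewrite author's own statement) =====
-- stated objective: alternative
-- what changed: Instead of re-partitioning the y-sorted list around its head twice (once per traversal, on deepcopies), B builds one explicit BST by iterated insertion in sorted order and collects the preorder and postorder lists in a single walk of that tree.
import Mathlib
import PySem

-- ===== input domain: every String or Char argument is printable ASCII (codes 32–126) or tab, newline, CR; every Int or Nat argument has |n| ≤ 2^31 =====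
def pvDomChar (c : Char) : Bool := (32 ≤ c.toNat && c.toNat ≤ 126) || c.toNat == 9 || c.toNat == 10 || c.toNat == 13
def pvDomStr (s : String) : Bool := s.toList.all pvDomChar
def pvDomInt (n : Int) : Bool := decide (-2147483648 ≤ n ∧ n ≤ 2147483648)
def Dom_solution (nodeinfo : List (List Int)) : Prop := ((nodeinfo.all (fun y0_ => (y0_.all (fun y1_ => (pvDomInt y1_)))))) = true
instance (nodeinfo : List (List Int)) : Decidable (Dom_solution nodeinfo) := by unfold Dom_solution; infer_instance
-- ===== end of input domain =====

-- B differs from A in the return-value computation only: one BST built by insertion and a single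
-- walk producing both traversals, instead of two head-partition recursions on deepcopies.
-- Both A and B mutate the argument in place (append node numbers, sort); only the RETURN value is claimed.

-- ===== PORT A =====

-- step 0 + step 1 of solution: append idx+1 to each row, then sort by (-row[1], row[0])
def enrichSort (nodeinfo : List (List Int)) : List (List Int) :=
  PySem.List.sorted2
    ((PySem.List.enumerate nodeinfo).map (fun p => p.2 ++ [p.1 + 1]))
    (fun n => -(PySem.List.pyGetD n 1 0)) (fun n => PySem.List.pyGetD n 0 0) false

-- split_nodes' partition condition: parent[0] > node[0] sends node left
def goesLeft (parent node : List Int) : Bool :=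
  PySem.List.pyGetD parent 0 0 > PySem.List.pyGetD node 0 0

-- preorder(nodeinfo, answer): recursion on the list, partitioning around the popped head
def preorderA : List (List Int) → List Int
  | [] => []
  | p :: rest =>
    PySem.List.pyGetD p 2 0 ::
      (preorderA (rest.filter (fun n => goesLeft p n)) ++
       preorderA (rest.filter (fun n => !goesLeft p n)))
termination_by l => l.length
decreasing_by
  all_goals
    simpa using Nat.lt_succ_of_le (le_trans (List.length_filter_le _ _) (by simp))

def postorderA : List (List Int) → List Int
  | [] => []
  | p :: rest =>
    postorderA (rest.filter (fun n => goesLeft p n)) ++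
    postorderA (rest.filter (fun n => !goesLeft p n)) ++
    [PySem.List.pyGetD p 2 0]
termination_by l => l.length
decreasing_by
  all_goals
    simpa using Nat.lt_succ_of_le (le_trans (List.length_filter_le _ _) (by simp))

def solution (nodeinfo : List (List Int)) : List (List Int) :=
  [preorderA (enrichSort nodeinfo), postorderA (enrichSort nodeinfo)]

-- ===== PORT B =====

inductive PTree where
  | leaf : PTree
  | node : Int → Int → PTree → PTree → PTree
deriving DecidableEq, Repr

-- _insert(t, x, v)
def insertB (t : PTree) (x v : Int) : PTree :=
  match t with
  | .leaf => .node x v .leaf .leaf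
  | .node tx tv l r =>
    if x < tx then .node tx tv (insertB l x v) r
    else .node tx tv l (insertB r x v)

-- _walk(t, pre, post): returns the two accumulator lists
def walkB (t : PTree) (pre post : List Int) : List Int × List Int :=
  match t with
  | .leaf => (pre, post)
  | .node _ v l r =>
    let (p1, q1) := walkB l (pre ++ [v]) post
    let (p2, q2) := walkB r p1 q1
    (p2, q2 ++ [v])

def solution_alt (nodeinfo : List (List Int)) : List (List Int) :=
  match walkB ((enrichSort nodeinfo).foldl
      (fun t n => insertB t (PySem.List.pyGetD n 0 0) (PySem.List.pyGetD n 2 0)) .leaf) [] [] with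
  | (pre, post) => [pre, post]

-- ===== PRECONDITION & SPEC =====
-- Pre_ excludes rows with fewer than two entries: on those Python A raises IndexError
-- (node[1] in the sort key or parent[2] in the traversals), returning no value.
def Pre_solution (nodeinfo : List (List Int)) : Prop :=
  ∀ row ∈ nodeinfo, 2 ≤ row.length

instance (nodeinfo : List (List Int)) : Decidable (Pre_solution nodeinfo) := by
  unfold Pre_solution; infer_instance

def pvWitness_solution : List (List Int) := [[5, 3], [11, 5], [13, 3]]

def Spec_solution (nodeinfo : List (List Int)) (out : List (List Int)) : Prop := out = solution_alt nodeinfo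
instance (nodeinfo : List (List Int)) (out : List (List Int)) : Decidable (Spec_solution nodeinfo out) := by unfold Spec_solution; infer_instance

-- ===== CLAIM (what is proved, stated in full; the proofs are below) =====
def Claim_equal_solution : Prop := ∀ (nodeinfo : List (List Int)), Dom_solution nodeinfo → Pre_solution nodeinfo → Spec_solution nodeinfo (solution nodeinfo)

-- ===== LEMMAS AND PROOFS =====

-- intended traversals of a tree
def preT : PTree → List Int
  | .leaf => []
  | .node _ v l r => v :: (preT l ++ preT r)

def postT : PTree → List Int
  | .leaf => []
  | .node _ v l r => postT l ++ postT r ++ [v]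

theorem walkB_eq (t : PTree) (pre post : List Int) :
    walkB t pre post = (pre ++ preT t, post ++ postT t) := by
  induction t generalizing pre post with
  | leaf => simp [walkB, preT, postT]
  | node x v l r ihl ihr => simp [walkB, preT, postT, ihl, ihr]

def gx (n : List Int) : Int := PySem.List.pyGetD n 0 0
def gv (n : List Int) : Int := PySem.List.pyGetD n 2 0

def treeOf (xs : List (List Int)) : PTree :=
  xs.foldl (fun t n => insertB t (gx n) (gv n)) .leaf

theorem foldl_insert_node (xs : List (List Int)) (x v : Int) (l r : PTree) :
    xs.foldl (fun t n => insertB t (gx n) (gv n)) (.node x v l r) =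
      .node x v ((xs.filter (fun n => decide (gx n < x))).foldl (fun t n => insertB t (gx n) (gv n)) l)
                ((xs.filter (fun n => !decide (gx n < x))).foldl (fun t n => insertB t (gx n) (gv n)) r) := by
  induction xs generalizing l r with
  | nil => simp
  | cons a xs ih =>
    simp only [List.foldl_cons, insertB, List.filter_cons]
    by_cases h : gx a < x
    · rw [if_pos h, ih]; simp [h]
    · rw [if_neg h, ih]; simp [h]

theorem treeOf_cons (p : List Int) (rest : List (List Int)) :
    treeOf (p :: rest) =
      .node (gx p) (gv p) (treeOf (rest.filter (fun n => goesLeft p n)))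
                          (treeOf (rest.filter (fun n => !goesLeft p n))) := by
  show List.foldl _ (insertB .leaf (gx p) (gv p)) rest = _
  simp only [insertB]
  rw [foldl_insert_node]
  unfold treeOf
  congr 1

theorem trav_treeOf : ∀ (k : Nat) (xs : List (List Int)), xs.length ≤ k →
    preT (treeOf xs) = preorderA xs ∧ postT (treeOf xs) = postorderA xs := by
  intro k
  induction k with
  | zero =>
    intro xs h
    have : xs = [] := List.eq_nil_of_length_eq_zero (Nat.le_zero.mp h)
    subst this
    simp [treeOf, preT, postT, preorderA, postorderA]
  | succ k ih =>
    intro xs h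
    match xs with
    | [] => simp [treeOf, preT, postT, preorderA, postorderA]
    | p :: rest =>
      have hl : (rest.filter (fun n => goesLeft p n)).length ≤ k :=
        le_trans (List.length_filter_le _ _) (Nat.le_of_succ_le_succ h)
      have hr : (rest.filter (fun n => !goesLeft p n)).length ≤ k :=
        le_trans (List.length_filter_le _ _) (Nat.le_of_succ_le_succ h)
      obtain ⟨ihl1, ihl2⟩ := ih _ hl
      obtain ⟨ihr1, ihr2⟩ := ih _ hr
      rw [treeOf_cons]
      constructor
      · rw [preorderA]
        simp only [preT, ihl1, ihr1, gv]
      · rw [postorderA]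
        simp only [postT, ihl2, ihr2, gv]

-- ===== VERDICT (by name: the statement is the Claim_ definition above) =====
theorem solution_spec : Claim_equal_solution := by
  intro nodeinfo _ _
  show solution nodeinfo = solution_alt nodeinfo
  unfold solution solution_alt
  have hfold : (enrichSort nodeinfo).foldl
      (fun t n => insertB t (PySem.List.pyGetD n 0 0) (PySem.List.pyGetD n 2 0)) .leaf
      = treeOf (enrichSort nodeinfo) := rfl
  rw [hfold, walkB_eq]
  obtain ⟨h1, h2⟩ := trav_treeOf (enrichSort nodeinfo).length (enrichSort nodeinfo) le_rfl
  simp [h1, h2]
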